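-- pv_equiv track=rewrite | github.com/ldq9526/obj_utils | obj2rendering.py | parse_attr_string
-- ===== SOURCE A (Python) =====
-- def string_to_index(string):
--     try:
--         return int(string) - 1
--     except:
--         return -1
--
-- def parse_attr_string(vertex_string):
--     vertex_attributes = [-1, -1, -1]
--     string = vertex_string[0:]
--     for i in range(3):
--         pos = string.find('/')
--         if pos < 0:
--             vertex_attributes[i] = string_to_index(string)
--             break
--         else:
--             vertex_attributes[i] = string_to_index(string[0: pos])
--             string = string[pos+1:]
--     return vertex_attributes
-- ===== SOURCE B (Python) =====
-- def string_to_index(string):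
--     try:
--         return int(string) - 1
--     except:
--         return -1
--
-- def parse_attr_string(vertex_string):
--     fields = vertex_string[0:].split('/')
--     vertex_attributes = [-1, -1, -1]
--     for i in range(min(3, len(fields))):
--         vertex_attributes[i] = string_to_index(fields[i])
--     return vertex_attributes
-- ===== Notes on version B (the rewrite author's own statement) =====
-- stated objective: simpler
-- what changed: One split('/') computes all fields up front and a flat index loop fills the first three slots, replacing A's repeated find/slice/reassign scan with its mid-loop break.
import Mathlib
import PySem

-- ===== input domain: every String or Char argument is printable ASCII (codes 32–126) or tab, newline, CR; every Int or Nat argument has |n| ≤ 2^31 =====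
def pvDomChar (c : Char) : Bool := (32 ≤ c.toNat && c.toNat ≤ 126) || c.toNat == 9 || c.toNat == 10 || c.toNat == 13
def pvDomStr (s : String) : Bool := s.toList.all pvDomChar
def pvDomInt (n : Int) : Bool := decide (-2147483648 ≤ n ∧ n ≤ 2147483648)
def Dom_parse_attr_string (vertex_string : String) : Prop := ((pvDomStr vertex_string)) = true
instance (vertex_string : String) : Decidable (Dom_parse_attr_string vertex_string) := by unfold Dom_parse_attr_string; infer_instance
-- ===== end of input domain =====

-- B replaces A's repeated find/slice/reassign scan (with a mid-loop break) by one split('/')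
-- followed by a flat index loop over the first three fields; objective: simpler.

-- ===== PORT A =====
def string_to_index (string : String) : Int :=
  match PySem.Int.ofStr? string with
  | some n => n - 1
  | none => -1

def parseAttrLoopA : List Int → List Int → String → List Int
  | [], vertex_attributes, _ => vertex_attributes
  | i :: rest, vertex_attributes, string =>
    let pos := PySem.Str.find string "/"
    if pos < 0 then
      PySem.List.pySetD vertex_attributes i (string_to_index string)
    else
      parseAttrLoopA rest
        (PySem.List.pySetD vertex_attributes i
          (string_to_index (PySem.Str.slice string (some 0) (some pos))))
        (PySem.Str.slice string (some (pos + 1)) none)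

def parse_attr_string (vertex_string : String) : List Int :=
  parseAttrLoopA (PySem.List.pyRange 0 3 1) [-1, -1, -1]
    (PySem.Str.slice vertex_string (some 0) none)

-- ===== PORT B =====
def parse_attr_string_alt (vertex_string : String) : List Int :=
  let fields := (PySem.Str.split? (PySem.Str.slice vertex_string (some 0) none) "/").getD []
  (PySem.List.pyRange 0 (min 3 (fields.length : Int)) 1).foldl
    (fun vertex_attributes i =>
      PySem.List.pySetD vertex_attributes i
        (string_to_index (PySem.List.pyGetD fields i "")))
    [-1, -1, -1]

-- ===== PRECONDITION & SPEC =====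
def Spec_parse_attr_string (vertex_string : String) (out : List Int) : Prop := out = parse_attr_string_alt vertex_string
instance (vertex_string : String) (out : List Int) : Decidable (Spec_parse_attr_string vertex_string out) := by unfold Spec_parse_attr_string; infer_instance

-- ===== CLAIM (what is proved, stated in full; the proofs are below) =====
def Claim_equal_parse_attr_string : Prop := ∀ (vertex_string : String), Dom_parse_attr_string vertex_string → Spec_parse_attr_string vertex_string (parse_attr_string vertex_string)

-- ===== LEMMAS AND PROOFS =====

/-- Structural recursion computing Python's `s.split('/')` field list. -/
def pvSplit : List Char → List (List Char)
  | [] => [[]]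
  | c :: rest =>
    if c = '/' then [] :: pvSplit rest
    else
      match pvSplit rest with
      | [] => [[c]]
      | f :: fs => (c :: f) :: fs

lemma pvSplit_ne_nil (l : List Char) : pvSplit l ≠ [] := by
  cases l with
  | nil => simp [pvSplit]
  | cons c rest =>
    simp only [pvSplit]
    split_ifs
    · simp
    · rcases h : pvSplit rest with _ | ⟨f, fs⟩ <;> simp

def pvConsHead (pre : List Char) : List (List Char) → List (List Char)
  | [] => [pre]
  | f :: fs => (pre ++ f) :: fs

lemma go_eq_pvSplit : ∀ (fuel : Nat) (l cur : List Char) (acc : List (List Char)),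
    l.length < fuel →
    PySem.Chars.splitOn.go ['/'] fuel l cur acc = acc.reverse ++ pvConsHead cur.reverse (pvSplit l) := by
  intro fuel
  induction fuel with
  | zero => intro l cur acc h; omega
  | succ f ih =>
    intro l cur acc h
    rw [PySem.Chars.splitOn.go.eq_def]
    cases l with
    | nil => simp [pvSplit, pvConsHead]
    | cons c rest =>
      by_cases hc : c = '/'
      · subst hc
        have hpre : (['/'].isPrefixOf ('/' :: rest)) = true := by simp [List.isPrefixOf]
        simp only [hpre, if_true]
        rw [show List.drop (['/'].length) ('/' :: rest) = rest from rfl]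
        rw [ih rest [] (cur.reverse :: acc) (by simpa using Nat.lt_of_succ_lt_succ h)]
        rcases hr : pvSplit rest with _ | ⟨g, gs⟩
        · exact absurd hr (pvSplit_ne_nil rest)
        · simp [pvSplit, pvConsHead, hr]
      · have hpre : (['/'].isPrefixOf (c :: rest)) = false := by
          simp [List.isPrefixOf]
          exact fun h' => hc h'.symm
        simp only [hpre, Bool.false_eq_true, if_false]
        rw [ih rest (c :: cur) acc (by simpa using Nat.lt_of_succ_lt_succ h)]
        rcases hr : pvSplit rest with _ | ⟨g, gs⟩
        · exact absurd hr (pvSplit_ne_nil rest)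
        · simp [pvSplit, pvConsHead, hr, hc]

lemma splitOn_eq_pvSplit (l : List Char) : PySem.Chars.splitOn l ['/'] = pvSplit l := by
  unfold PySem.Chars.splitOn
  rw [go_eq_pvSplit (l.length + 1) l [] [] (by omega)]
  rcases hr : pvSplit l with _ | ⟨g, gs⟩
  · exact absurd hr (pvSplit_ne_nil l)
  · simp [pvConsHead]

lemma pvSplit_no_slash : ∀ l : List Char, '/' ∉ l → pvSplit l = [l] := by
  intro l hl
  induction l with
  | nil => rfl
  | cons c rest ih =>
    have hc : c ≠ '/' := fun h => hl (by simp [h])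
    have := ih (fun h => hl (List.mem_cons_of_mem _ h))
    simp [pvSplit, hc, this]

lemma pvSplit_decomp : ∀ (l : List Char) (p : Nat), l[p]? = some '/' →
    (∀ i < p, l[i]? ≠ some '/') →
    pvSplit l = l.take p :: pvSplit (l.drop (p + 1)) := by
  intro l
  induction l with
  | nil => intro p hp _; simp at hp
  | cons c rest ih =>
    intro p hp hmin
    cases p with
    | zero =>
      simp at hp
      simp [pvSplit, hp]
    | succ q =>
      have hc : c ≠ '/' := by
        have := hmin 0 (Nat.succ_pos q)
        simpa using this
      have hrest := ih q (by simpa using hp) (by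
        intro i hi
        have := hmin (i + 1) (by omega)
        simpa using this)
      rcases hr : pvSplit (rest.drop (q + 1)) with _ | ⟨g, gs⟩
      · exact absurd hr (pvSplit_ne_nil _)
      · simp [pvSplit, hc, hrest, hr]

lemma singleton_prefix_iff (a : Char) (t : List Char) : [a] <+: t ↔ t.head? = some a := by
  cases t with
  | nil => simp
  | cons b bs => simp [List.cons_prefix_cons, eq_comm]

lemma find_neg_no_slash (l : List Char) (h : PySem.Chars.find l ['/'] < 0) : '/' ∉ l := by
  have h1 : PySem.Chars.find l ['/'] = -1 := by
    have := PySem.Chars.neg_one_le_find l ['/']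
    omega
  have h2 := (PySem.Chars.find_eq_neg_one_iff l ['/']).mp h1
  intro hmem
  obtain ⟨i, hi, hget⟩ := List.getElem_of_mem hmem
  refine h2 ((List.infix_iff_prefix_suffix).mpr ⟨l.drop i, ?_, List.drop_suffix i l⟩)
  exact (singleton_prefix_iff '/' _).mpr (by rw [List.head?_drop, List.getElem?_eq_getElem hi, hget])

lemma find_pos_spec (l : List Char) (h : 0 ≤ PySem.Chars.find l ['/']) :
    l[(PySem.Chars.find l ['/']).toNat]? = some '/' ∧
    ∀ i < (PySem.Chars.find l ['/']).toNat, l[i]? ≠ some '/' := by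
  obtain ⟨h1, h2⟩ := PySem.Chars.find_spec (s := l) (sub := ['/']) h
  constructor
  · have := (singleton_prefix_iff '/' _).mp h1
    rwa [List.head?_drop] at this
  · intro i hi hbad
    exact h2 i hi ((singleton_prefix_iff '/' _).mpr (by rwa [List.head?_drop]))

/-- What A's loop computes, expressed on the field list. -/
def loopSpec : List Int → List Int → List (List Char) → List Int
  | [], va, _ => va
  | _ :: _, va, [] => va
  | i :: is, va, f :: fs =>
    match fs with
    | [] => PySem.List.pySetD va i (string_to_index (String.ofList f))
    | _ :: _ =>
      loopSpec is (PySem.List.pySetD va i (string_to_index (String.ofList f))) fs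

lemma loopA_eq_loopSpec : ∀ (is : List Int) (l : List Char) (va : List Int),
    parseAttrLoopA is va (String.ofList l) = loopSpec is va (pvSplit l) := by
  intro is
  induction is with
  | nil =>
    intro l va
    rcases h : pvSplit l with _ | ⟨f, fs⟩ <;> simp [parseAttrLoopA, loopSpec]
  | cons i rest ih =>
    intro l va
    have hfind : PySem.Str.find (String.ofList l) "/" = PySem.Chars.find l ['/'] := by
      simp [PySem.Str.find]
    by_cases hp : PySem.Chars.find l ['/'] < 0
    · have hsplit := pvSplit_no_slash l (find_neg_no_slash l hp)
      simp [parseAttrLoopA, hp, hsplit, loopSpec]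
    · rw [not_lt] at hp
      obtain ⟨hget, hmin⟩ := find_pos_spec l hp
      set p := (PySem.Chars.find l ['/']).toNat with hpdef
      have hsplit := pvSplit_decomp l p hget hmin
      have hslice1 : PySem.Str.slice (String.ofList l) (some 0) (some (PySem.Chars.find l ['/'])) =
          String.ofList (l.take p) := by
        simp [PySem.Str.slice, PySem.List.slice_to l hp, hpdef]
      have hslice2 : PySem.Str.slice (String.ofList l) (some (PySem.Chars.find l ['/'] + 1)) none =
          String.ofList (l.drop (p + 1)) := by
        have h1 : (0:Int) ≤ PySem.Chars.find l ['/'] + 1 := by omega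
        have h2 : (PySem.Chars.find l ['/'] + 1).toNat = p + 1 := by omega
        simp [PySem.Str.slice, PySem.List.slice_from l h1, h2]
      rcases hr : pvSplit (l.drop (p + 1)) with _ | ⟨g, gs⟩
      · exact absurd hr (pvSplit_ne_nil _)
      · simp only [parseAttrLoopA, hfind]
        rw [if_neg (by omega)]
        rw [hslice1, hslice2, ih (l.drop (p + 1)) _, hsplit, hr]
        simp [loopSpec]

lemma loopSpec_eq_fold (F : List (List Char)) (hF : F ≠ []) :
    loopSpec [0, 1, 2] [-1, -1, -1] F =
      (PySem.List.pyRange 0 (min 3 ((F.map String.ofList).length : Int)) 1).foldl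
        (fun va i =>
          PySem.List.pySetD va i (string_to_index (PySem.List.pyGetD (F.map String.ofList) i "")))
        [-1, -1, -1] := by
  match F, hF with
  | [f], _ =>
    have hr : PySem.List.pyRange 0 (min 3 ((1:Nat):Int)) 1 = [0] := by decide
    simp only [List.map, List.length, hr, List.foldl, loopSpec,
      PySem.List.pyGetD_ofNat', List.getD]
    rfl
  | [f1, f2], _ =>
    have hr : PySem.List.pyRange 0 (min 3 ((2:Nat):Int)) 1 = [0, 1] := by decide
    simp only [List.map, List.length, hr, List.foldl, loopSpec,
      PySem.List.pyGetD_ofNat', List.getD]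
    rfl
  | [f1, f2, f3], _ =>
    have hr : PySem.List.pyRange 0 (min 3 ((3:Nat):Int)) 1 = [0, 1, 2] := by decide
    simp only [List.map, List.length, hr, List.foldl, loopSpec,
      PySem.List.pyGetD_ofNat', List.getD]
    rfl
  | f1 :: f2 :: f3 :: f4 :: rest, _ =>
    have hmin : min 3 (((f1 :: f2 :: f3 :: f4 :: rest).map String.ofList).length : Int) = 3 := by
      simp; omega
    rw [hmin]
    have hr : PySem.List.pyRange 0 3 1 = [0, 1, 2] := by decide
    simp only [hr, List.foldl, loopSpec, List.map, PySem.List.pyGetD_ofNat', List.getD,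
      List.getElem?_cons_succ, List.getElem?_cons_zero, Option.getD_some]

theorem parse_attr_string_eq (s : String) : parse_attr_string s = parse_attr_string_alt s := by
  have hsl : PySem.Str.slice s (some 0) none = String.ofList s.toList := by
    simp [PySem.Str.slice, pysem]
  have hfields : (PySem.Str.split? (String.ofList s.toList) "/").getD [] =
      (pvSplit s.toList).map String.ofList := by
    simp [PySem.Str.split?, PySem.Chars.split?, splitOn_eq_pvSplit]
  unfold parse_attr_string parse_attr_string_alt
  rw [hsl]
  show parseAttrLoopA (PySem.List.pyRange 0 3 1) [-1, -1, -1] (String.ofList s.toList) =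
    (PySem.List.pyRange 0
        (min 3 (((PySem.Str.split? (String.ofList s.toList) "/").getD []).length : Int)) 1).foldl
      (fun va i =>
        PySem.List.pySetD va i
          (string_to_index (PySem.List.pyGetD ((PySem.Str.split? (String.ofList s.toList) "/").getD []) i "")))
      [-1, -1, -1]
  rw [hfields, loopA_eq_loopSpec]
  have h3 : PySem.List.pyRange 0 3 1 = [0, 1, 2] := by decide
  rw [h3, loopSpec_eq_fold _ (pvSplit_ne_nil _)]

-- ===== VERDICT (by name: the statement is the Claim_ definition above) =====
theorem parse_attr_string_spec : Claim_equal_parse_attr_string := by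
  intro s _
  unfold Spec_parse_attr_string
  exact parse_attr_string_eq s
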